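-- pv_equiv track=rewrite | github.com/nd1836017/https-github.com-nd1836017-desktop-vlm-agent | agent/profile_picker.py | match_profile_label
-- ===== SOURCE A (Python) =====
-- import unicodedata
--
-- def normalize_profile_label(label: str) -> str:
--     """Trim, NFKC-normalize, and casefold a profile label for comparison.
--
--     Profile names can contain leading/trailing whitespace, multiple
--     spaces between tokens (e.g. ``"Nhan  Doan"``), and unicode quirks
--     (full-width characters, accented letters). NFKC normalization
--     collapses compatibility characters; casefold is the unicode-aware
--     equivalent of lower (it correctly handles e.g. German ß).
--     """
--     if not label:
--         return ""
--     # NFKC handles full-width / half-width / compat-decomposable chars.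
--     text = unicodedata.normalize("NFKC", label)
--     # Collapse internal whitespace runs to a single space so
--     # "Nhan  Doan" matches "Nhan Doan".
--     text = " ".join(text.split())
--     return text.casefold()
--
-- def match_profile_label(
--     available: list[str],
--     target: str,
-- ) -> int | None:
--     """Return the 0-based index of ``target`` in ``available`` or ``None``.
--
--     Resolution order:
--
--     1. Exact match after :func:`normalize_profile_label` on both sides.
--        If multiple cards have the same normalized label we return the
--        first one — Chrome itself doesn't allow duplicate exact names,
--        but a stray whitespace-only diff between two cards would
--        collapse to identical normalized form.
--     2. Single substring match. The target is the haystack; each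
--        available label is the needle. Useful when the target is a
--        full name like "Nhan Doan" and the card label is just "Nhan",
--        or vice-versa. We require *exactly one* substring match —
--        multiple hits is ambiguous and we'd rather fail loudly than
--        click the wrong profile.
--
--     Returns ``None`` when neither rule produces a confident match.
--     """
--     if not target or not available:
--         return None
--     norm_target = normalize_profile_label(target)
--     if not norm_target:
--         return None
--
--     norm_available = [normalize_profile_label(label) for label in available]
--
--     # Step 1: exact match.
--     for idx, label in enumerate(norm_available):
--         if label == norm_target:
--             return idx
--
--     # Step 2: bidirectional substring match.
--     matches: list[int] = []
--     for idx, label in enumerate(norm_available):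
--         if not label:
--             continue
--         if norm_target in label or label in norm_target:
--             matches.append(idx)
--     if len(matches) == 1:
--         return matches[0]
--     return None
-- ===== SOURCE B (Python) =====
-- import unicodedata
--
-- def normalize_profile_label(label: str) -> str:
--     if not label:
--         return ""
--     text = unicodedata.normalize("NFKC", label)
--     text = " ".join(text.split())
--     return text.casefold()
--
-- def match_profile_label(available, target):
--     """Single pass: return the first exact match immediately (exact matches
--     always win over substring candidates); otherwise collect substring
--     candidates and accept only an unambiguous single one."""
--     if not target or not available:
--         return None
--     norm_target = normalize_profile_label(target)
--     if not norm_target: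
--         return None
--     candidates = []
--     for idx, label in enumerate(available):
--         norm = normalize_profile_label(label)
--         if norm == norm_target:
--             return idx
--         if norm and (norm_target in norm or norm in norm_target):
--             candidates.append(idx)
--     return candidates[0] if len(candidates) == 1 else None
-- ===== Notes on version B (the rewrite author's own statement) =====
-- stated objective: simpler
-- what changed: Replaces A's two separate enumerate scans (exact-match pass, then substring-candidate pass) with one loop that returns an exact match immediately and otherwise accumulates substring candidates, deciding on the collected list at the end.
import Mathlib
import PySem

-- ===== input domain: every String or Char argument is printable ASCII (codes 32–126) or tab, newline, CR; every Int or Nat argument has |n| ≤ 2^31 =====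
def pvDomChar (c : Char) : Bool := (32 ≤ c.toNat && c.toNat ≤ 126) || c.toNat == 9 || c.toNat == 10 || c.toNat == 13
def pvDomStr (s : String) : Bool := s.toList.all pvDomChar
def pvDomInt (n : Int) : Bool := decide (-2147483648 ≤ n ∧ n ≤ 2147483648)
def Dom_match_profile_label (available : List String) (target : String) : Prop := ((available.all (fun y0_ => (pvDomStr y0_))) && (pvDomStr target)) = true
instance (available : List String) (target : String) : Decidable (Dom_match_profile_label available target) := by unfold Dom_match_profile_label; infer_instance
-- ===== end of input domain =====

-- B collapses A's two separate scans over the normalized labels into one pass that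
-- returns an exact match immediately and otherwise collects substring candidates (simpler decomposition).


-- ===== PORT A =====
-- normalize_profile_label: on the ASCII domain NFKC is the identity and casefold = lower,
-- so the port is " ".join(label.split()).lower() guarded by the empty-string check (exact on Dom).
def normalizeProfileLabel (label : String) : String :=
  if label = "" then ""
  else PySem.Str.lower (PySem.Str.join " " (PySem.Str.split₀ label))

-- step 1 of A: first index whose normalized label equals norm_target
def aExact : List String → String → Int → Option Int
  | [], _, _ => none
  | l :: ls, nt, i => if l = nt then some i else aExact ls nt (i + 1)

-- step 2 of A: collect indices of non-empty labels with a bidirectional substring hit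
def aCollect : List String → String → Int → List Int
  | [], _, _ => []
  | l :: ls, nt, i =>
    if l = "" then aCollect ls nt (i + 1)
    else if PySem.Str.isIn nt l || PySem.Str.isIn l nt then i :: aCollect ls nt (i + 1)
    else aCollect ls nt (i + 1)

def match_profile_label (available : List String) (target : String) : Option Int :=
  if target = "" ∨ available = [] then none
  else
    let normTarget := normalizeProfileLabel target
    if normTarget = "" then none
    else
      let normAvailable := available.map normalizeProfileLabel
      match aExact normAvailable normTarget 0 with
      | some idx => some idx
      | none =>
        let matchesL := aCollect normAvailable normTarget 0
        if matchesL.length = 1 then some (matchesL.headD 0) else none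

-- ===== PORT B =====
-- B's single loop: exact match returns at once, otherwise substring candidates accumulate
def bLoop : List String → String → Int → List Int → Option Int
  | [], _, _, cand => if cand.length = 1 then some (cand.headD 0) else none
  | l :: ls, nt, i, cand =>
    let norm := normalizeProfileLabel l
    if norm = nt then some i
    else if norm = "" then bLoop ls nt (i + 1) cand
    else if PySem.Str.isIn nt norm || PySem.Str.isIn norm nt then
      bLoop ls nt (i + 1) (cand ++ [i])
    else bLoop ls nt (i + 1) cand

def match_profile_label_alt (available : List String) (target : String) : Option Int :=
  if target = "" ∨ available = [] then none
  else
    let normTarget := normalizeProfileLabel target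
    if normTarget = "" then none
    else bLoop available normTarget 0 []

-- ===== PRECONDITION & SPEC =====
def Spec_match_profile_label (available : List String) (target : String) (out : Option Int) : Prop := out = match_profile_label_alt available target
instance (available : List String) (target : String) (out : Option Int) : Decidable (Spec_match_profile_label available target out) := by unfold Spec_match_profile_label; infer_instance

-- ===== CLAIM (what is proved, stated in full; the proofs are below) =====
def Claim_equal_match_profile_label : Prop := ∀ (available : List String) (target : String), Dom_match_profile_label available target → Spec_match_profile_label available target (match_profile_label available target)

-- ===== LEMMAS AND PROOFS =====

-- B's single pass equals A's two scans, for any start index and accumulated candidates.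
theorem bLoop_eq (ls : List String) (nt : String) :
    ∀ (i : Int) (cand : List Int),
      bLoop ls nt i cand =
        match aExact (ls.map normalizeProfileLabel) nt i with
        | some j => some j
        | none =>
          let m := cand ++ aCollect (ls.map normalizeProfileLabel) nt i
          if m.length = 1 then some (m.headD 0) else none := by
  induction ls with
  | nil => intro i cand; simp [bLoop, aExact, aCollect]
  | cons l ls ih =>
    intro i cand
    by_cases h1 : normalizeProfileLabel l = nt
    · simp [bLoop, aExact, h1]
    · by_cases h2 : normalizeProfileLabel l = ""
      · have hne : ¬ nt = "" := fun h => h1 (h2.trans h.symm)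
        simp [bLoop, aExact, aCollect, h2, hne, ih]
      · by_cases h3 : (PySem.Chars.isIn nt.toList (normalizeProfileLabel l).toList = true
            ∨ PySem.Chars.isIn (normalizeProfileLabel l).toList nt.toList = true)
        · simp [bLoop, aExact, aCollect, h1, h2, h3, ih]
        · simp [bLoop, aExact, aCollect, h1, h2, h3, ih]

-- ===== VERDICT (by name: the statement is the Claim_ definition above) =====
theorem match_profile_label_spec : Claim_equal_match_profile_label := by
  intro available target _
  unfold Spec_match_profile_label match_profile_label match_profile_label_alt
  by_cases hg : target = "" ∨ available = []
  · simp [hg]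
  · simp only [hg, if_false]
    by_cases hnt : normalizeProfileLabel target = ""
    · simp [hnt]
    · simp only [hnt, if_false, bLoop_eq]
      cases aExact (available.map normalizeProfileLabel) (normalizeProfileLabel target) 0 <;> simp
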